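-- pv_equiv track=rewrite | github.com/bishal5917/LeetCoding | Python/MultiStringSearch.py | MultiStringSearch
-- ===== SOURCE A (Python) =====
-- def MultiStringSearch(str, strs):
--     foundarr = [False for _ in strs]
--
--     for x in range(0, len(strs)):
--         i = 0
--         j = 0
--         item = strs[x]
--         while i < len(str) and j < len(item):
--             if str[i] == item[j]:
--                 i += 1
--                 j += 1
--             else:
--                 i += 1
--         foundarr[x] = True if j == len(item) else False
--
--     return foundarr
-- ===== SOURCE B (Python) =====
-- def MultiStringSearch(str, strs):
--     # Precompute, for every position i of str, the next occurrence (index >= i)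
--     # of each character: table[i] maps char -> smallest j >= i with str[j] == char.
--     n = len(str)
--     table = [None] * (n + 1)
--     cur = {}
--     table[n] = cur
--     for i in range(n - 1, -1, -1):
--         cur = dict(cur)
--         cur[str[i]] = i
--         table[i] = cur
--     res = []
--     for item in strs:
--         pos = 0
--         ok = True
--         for c in item:
--             j = table[pos].get(c)
--             if j is None:
--                 ok = False
--                 break
--             pos = j + 1
--         res.append(ok)
--     return res
-- ===== Notes on version B (the rewrite author's own statement) =====
-- stated objective: faster
-- what changed: B precomputes a next-occurrence table of str once and answers each subsequence query by O(1) jumps per query character, instead of A's fresh two-pointer scan of str for every query string.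
import Mathlib
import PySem

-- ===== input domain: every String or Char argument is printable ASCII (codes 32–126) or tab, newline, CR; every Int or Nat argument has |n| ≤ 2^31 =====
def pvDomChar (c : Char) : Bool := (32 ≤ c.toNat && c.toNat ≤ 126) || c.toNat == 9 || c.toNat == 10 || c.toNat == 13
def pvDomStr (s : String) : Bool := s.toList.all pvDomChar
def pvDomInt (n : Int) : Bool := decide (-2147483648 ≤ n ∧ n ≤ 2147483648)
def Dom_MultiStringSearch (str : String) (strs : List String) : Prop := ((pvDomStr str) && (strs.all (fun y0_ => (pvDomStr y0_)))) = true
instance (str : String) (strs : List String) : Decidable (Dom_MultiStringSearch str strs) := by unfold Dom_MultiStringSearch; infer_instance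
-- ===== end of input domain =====

-- B replaces A's per-query two-pointer scan of str by a precomputed next-occurrence
-- table of str, answering each query character by one table jump (objective: faster).


-- ===== PORT A =====
-- A's inner while loop: i scans str, j scans item; both pointers are represented
-- by the corresponding suffixes of str/item; the loop result is (j == len(item)),
-- i.e. the item suffix became empty.
def pvACheck : List Char → List Char → Bool
  | _, [] => true
  | [], _ :: _ => false
  | a :: s, c :: t => if a == c then pvACheck s t else pvACheck s (c :: t)

def MultiStringSearch (str : String) (strs : List String) : List Bool :=
  strs.map (fun item => pvACheck str.toList item.toList)

-- ===== PORT B =====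
-- Source B's backward build of table[0..n]: table[i] maps c to the smallest j ≥ i with
-- str[j] = c; entry i is the copy of entry i+1 with str[i] inserted at key str[i].
def pvBTables : List Char → Nat → List (PySem.Dict Char Nat)
  | [], _ => [PySem.Dict.empty]
  | a :: s, i =>
    let rest := pvBTables s (i + 1)
    (rest.headD PySem.Dict.empty).insert a i :: rest

-- Source B's per-item loop: pos jumps via the table; None lookup breaks with False.
def pvBLoop (tables : List (PySem.Dict Char Nat)) (pos : Nat) : List Char → Bool
  | [] => true
  | c :: t =>
    match (tables.getD pos PySem.Dict.empty).get? c with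
    | none => false
    | some j => pvBLoop tables (j + 1) t

def MultiStringSearch_alt (str : String) (strs : List String) : List Bool :=
  let tables := pvBTables str.toList 0
  strs.map (fun item => pvBLoop tables 0 item.toList)

-- ===== PRECONDITION & SPEC =====
def Spec_MultiStringSearch (str : String) (strs : List String) (out : List Bool) : Prop := out = MultiStringSearch_alt str strs
instance (str : String) (strs : List String) (out : List Bool) : Decidable (Spec_MultiStringSearch str strs out) := by unfold Spec_MultiStringSearch; infer_instance

-- ===== CLAIM (what is proved, stated in full; the proofs are below) =====
def Claim_equal_MultiStringSearch : Prop := ∀ (str : String) (strs : List String), Dom_MultiStringSearch str strs → Spec_MultiStringSearch str strs (MultiStringSearch str strs)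

-- ===== LEMMAS AND PROOFS =====

theorem pvBTables_headD (s : List Char) (b : Nat) :
    (pvBTables s b).headD PySem.Dict.empty = (pvBTables s b).getD 0 PySem.Dict.empty := by
  cases s <;> rfl

-- table correctness: entry k of the table built with base b maps c to the
-- absolute index (b + k + j) of the first occurrence of c in s.drop k.
theorem pvBTables_get (s : List Char) (b k : Nat) (hk : k ≤ s.length) (c : Char) :
    ((pvBTables s b).getD k PySem.Dict.empty).get? c
      = ((s.drop k).findIdx? (· == c)).map (fun j => b + k + j) := by
  induction s generalizing b k with
  | nil =>
    obtain rfl : k = 0 := Nat.le_zero.mp (by simpa using hk)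
    simp [pvBTables, PySem.Dict.get?_empty]
  | cons a s ih =>
    cases k with
    | zero =>
      show ((pvBTables (a :: s) b).getD 0 _).get? c = _
      simp only [pvBTables, List.getD_cons_zero, pvBTables_headD]
      rw [PySem.Dict.get?_insert, ih (b+1) 0 (Nat.zero_le _)]
      simp only [List.drop_zero] at *
      rw [List.findIdx?_cons]
      by_cases hca : c = a
      · subst hca; simp
      · have : (a == c) = false := by simp; exact fun h => hca h.symm
        simp only [this, if_neg hca, Bool.false_eq_true, if_false]
        cases hfi : s.findIdx? (· == c) <;> simp [Nat.add_comm, Nat.add_left_comm]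
    | succ k =>
      show ((pvBTables (a :: s) b).getD (k+1) _).get? c = _
      simp only [pvBTables, List.getD_cons_succ]
      rw [ih (b+1) k (by simpa using hk)]
      simp only [List.drop_succ_cons]
      cases hfi : (s.drop k).findIdx? (· == c) <;> simp [Nat.add_comm, Nat.add_left_comm]

-- A's scan at item character c: find the first occurrence of c, continue after it.
theorem pvACheck_cons (u : List Char) (c : Char) (t : List Char) :
    pvACheck u (c :: t)
      = match u.findIdx? (· == c) with
        | none => false
        | some j => pvACheck (u.drop (j + 1)) t := by
  induction u with
  | nil => rfl
  | cons a u ih =>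
    rw [List.findIdx?_cons]
    by_cases h : a == c
    · have hac : a = c := by simpa using h
      simp [pvACheck, hac]
    · simp only [pvACheck, if_false, ih, h, Bool.false_eq_true]
      cases hfi : u.findIdx? (· == c) <;> simp

theorem pvB_eq_pvA (t : List Char) (s : List Char) (pos : Nat) (hpos : pos ≤ s.length) :
    pvBLoop (pvBTables s 0) pos t = pvACheck (s.drop pos) t := by
  induction t generalizing pos with
  | nil => cases h : s.drop pos <;> rfl
  | cons c t ih =>
    rw [pvACheck_cons]
    show (match ((pvBTables s 0).getD pos PySem.Dict.empty).get? c with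
          | none => false
          | some j => pvBLoop (pvBTables s 0) (j + 1) t) = _
    rw [pvBTables_get s 0 pos hpos c]
    cases hfi : (s.drop pos).findIdx? (· == c) with
    | none => simp
    | some j =>
      have hj : j < (s.drop pos).length :=
        (List.findIdx?_eq_some_iff_findIdx_eq.mp hfi).1
      have hlen : pos + j + 1 ≤ s.length := by
        simp [List.length_drop] at hj; omega
      simp only [Option.map_some, Nat.zero_add]
      rw [ih (pos + j + 1) hlen, List.drop_drop, Nat.add_assoc]

-- ===== VERDICT (by name: the statement is the Claim_ definition above) =====
theorem MultiStringSearch_spec : Claim_equal_MultiStringSearch := by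
  intro str strs _
  show MultiStringSearch str strs = MultiStringSearch_alt str strs
  unfold MultiStringSearch MultiStringSearch_alt
  refine List.map_congr_left (fun item _ => ?_)
  rw [pvB_eq_pvA item.toList str.toList 0 (Nat.zero_le _), List.drop_zero]
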